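-- pv_equiv track=rewrite | github.com/Airyshtoteles/learnLeetCode | Day52/Part5/hex_arena.py | solve_hex_arena
-- ===== SOURCE A (Python) =====
-- from collections import deque
--
-- def solve_hex_arena(hex_list):
--     # hex_list: list of (q, r, char)
--     grid = {}
--     start_pos = None
--     end_pos = None
--
--     for q, r, char in hex_list:
--         grid[(q, r)] = char
--         if char == 'S':
--             start_pos = (q, r)
--         elif char == 'E':
--             end_pos = (q, r)
--
--     if not start_pos or not end_pos:
--         return -1
--
--     # BFS
--     # State: (q, r, mask)
--     queue = deque([(start_pos[0], start_pos[1], 0, 0)]) # q, r, mask, steps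
--     visited = set([(start_pos[0], start_pos[1], 0)])
--
--     # Hex neighbors (Axial)
--     # +q, -r | +q, 0 | 0, +r | -q, +r | -q, 0 | 0, -r ??
--     # Standard Axial neighbors:
--     # (1, 0), (1, -1), (0, -1), (-1, 0), (-1, 1), (0, 1)
--     neighbors = [
--         (1, 0), (1, -1), (0, -1),
--         (-1, 0), (-1, 1), (0, 1)
--     ]
--
--     while queue:
--         q, r, mask, steps = queue.popleft()
--
--         if (q, r) == end_pos:
--             return steps
--
--         for dq, dr in neighbors:
--             nq, nr = q + dq, r + dr
--
--             if (nq, nr) in grid: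
--                 cell = grid[(nq, nr)]
--
--                 if cell == '#':
--                     continue
--
--                 new_mask = mask
--                 is_passable = True
--
--                 # Check Barrier
--                 if 'A' <= cell <= 'J' and cell != 'E':
--                     barrier_id = ord(cell) - ord('A')
--                     if not (mask & (1 << barrier_id)):
--                         is_passable = False
--
--                 # Check Plate
--                 if 'a' <= cell <= 'j':
--                     plate_id = ord(cell) - ord('a')
--                     new_mask = mask ^ (1 << plate_id)
--
--                 if is_passable:
--                     if (nq, nr, new_mask) not in visited:
--                         visited.add((nq, nr, new_mask))
--                         queue.append((nq, nr, new_mask, steps + 1))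
--
--     return -1
-- ===== SOURCE B (Python) =====
-- def solve_hex_arena(hex_list):
--     grid = {(q, r): c for q, r, c in hex_list}
--     start = end = None
--     for q, r, c in hex_list:
--         if c == 'S':
--             start = (q, r)
--         elif c == 'E':
--             end = (q, r)
--     if not start or not end:
--         return -1
--
--     deltas = ((1, 0), (1, -1), (0, -1), (-1, 0), (-1, 1), (0, 1))
--     # Bellman-Ford-style reachable-set relaxation: `reach` holds every (q, r, mask)
--     # state attainable in at most `depth` steps; there are at most 1024*len(hex_list)
--     # distinct states, so that many relaxation rounds always suffice.
--     reach = {(start[0], start[1], 0)}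
--     for depth in range(1024 * len(hex_list) + 1):
--         if any((q, r) == end for q, r, _ in reach):
--             return depth
--         bigger = set(reach)
--         for q, r, mask in reach:
--             for dq, dr in deltas:
--                 cell = grid.get((q + dq, r + dr))
--                 if cell is None or cell == '#':
--                     continue
--                 if 'A' <= cell <= 'J' and cell != 'E' and not (mask >> (ord(cell) - 65)) & 1:
--                     continue
--                 nm = mask ^ (1 << (ord(cell) - 97)) if 'a' <= cell <= 'j' else mask
--                 bigger.add((q + dq, r + dr, nm))
--         if len(bigger) == len(reach):
--             return -1
--         reach = bigger
--     return -1
-- ===== Notes on version B (the rewrite author's own statement) =====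
-- stated objective: alternative
-- what changed: Replaces the queue-and-visited BFS with Bellman-Ford-style reachable-set relaxation: a single set `reach` of (q,r,mask) states is expanded wholesale each round (reach := reach ∪ successors(reach)) with no queue, no per-state visited bookkeeping and no per-entry step counters; the answer is the first round at which the end position appears in `reach`, with -1 on set stabilization or round-bound exhaustion.
-- outside the precondition, e.g. on solve_hex_arena([(0, 0, 'S'), (1, 0, 'ab'), (0, 1, 'E')]): A raises TypeError, B raises TypeError; on solve_hex_arena([(0, 0, 'S'), (2, 2, 'E'), (9, 9, 'ab')]): A returns -1, B returns -1
import Mathlib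
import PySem

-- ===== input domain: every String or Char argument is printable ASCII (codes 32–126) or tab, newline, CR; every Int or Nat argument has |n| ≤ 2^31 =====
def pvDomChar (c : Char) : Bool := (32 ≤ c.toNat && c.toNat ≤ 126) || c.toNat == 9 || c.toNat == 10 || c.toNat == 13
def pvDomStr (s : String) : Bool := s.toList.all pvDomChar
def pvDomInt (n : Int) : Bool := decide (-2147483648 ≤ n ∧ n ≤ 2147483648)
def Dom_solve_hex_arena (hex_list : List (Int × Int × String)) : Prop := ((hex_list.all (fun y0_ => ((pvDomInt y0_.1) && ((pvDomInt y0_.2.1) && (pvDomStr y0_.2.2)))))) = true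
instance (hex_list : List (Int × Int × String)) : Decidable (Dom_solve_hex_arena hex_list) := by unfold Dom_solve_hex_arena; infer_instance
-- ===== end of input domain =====

-- B replaces A's queue-and-visited BFS by Bellman-Ford-style reachable-set relaxation: one set
-- of (q, r, mask) states is expanded wholesale each round until the end position appears
-- (returning the round number), the set stabilizes, or the state-count round bound runs out;
-- 'alternative' objective, not faster.

-- ===== PORT A =====
-- Python string '<=' (code-point lexicographic); exact via PySem.Chars.strLt.
def strLeA (a b : List Char) : Bool := !PySem.Chars.strLt b a
-- Python ord(c); exact for length-1 strings — the only strings on which the Python calls ord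
-- under Pre_solve_hex_arena (on longer strings Python raises TypeError, excluded by Pre_).
def ordA (c : List Char) : Nat := (c.headD 'A').toNat

def neighborsA : List (Int × Int) := [(1, 0), (1, -1), (0, -1), (-1, 0), (-1, 1), (0, 1)]
-- inner 'for dq, dr in neighbors' loop of A: returns (visited, list of states appended this pop)
def expandA (grid : PySem.Dict (Int × Int) String) (q r : Int) (mask : Nat)
    (visited : PySem.Set (Int × Int × Nat)) :
    PySem.Set (Int × Int × Nat) × List (Int × Int × Nat) :=
  neighborsA.foldl (fun st dd =>
    let nq := q + dd.1
    let nr := r + dd.2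
    match grid.get? (nq, nr) with
    | none => st
    | some cell =>
      if cell = "#" then st
      else
        let newMask :=
          if strLeA "a".toList cell.toList && strLeA cell.toList "j".toList then
            mask ^^^ (1 <<< (ordA cell.toList - 97))
          else mask
        let passable :=
          !(strLeA "A".toList cell.toList && strLeA cell.toList "J".toList && cell != "E"
            && (mask &&& (1 <<< (ordA cell.toList - 65)) == 0))
        if passable then
          if st.1.contains (nq, nr, newMask) then st
          else (st.1.add (nq, nr, newMask), st.2 ++ [(nq, nr, newMask)])
        else st) (visited, [])

-- the 'while queue' loop of A; fuel (1 unit per pop) only makes the recursion total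
def bfsA (grid : PySem.Dict (Int × Int) String) (endp : Int × Int) :
    Nat → List (Int × Int × Nat × Int) → PySem.Set (Int × Int × Nat) → Int
  | _, [], _ => -1
  | 0, _ :: _, _ => -1
  | f + 1, (q, r, mask, steps) :: rest, visited =>
    if (q, r) = endp then steps
    else
      let p := expandA grid q r mask visited
      bfsA grid endp f (rest ++ p.2.map (fun s => (s.1, s.2.1, s.2.2, steps + 1))) p.1

def solve_hex_arena (hex_list : List (Int × Int × String)) : Int :=
  let init :=
    hex_list.foldl
      (fun (st : PySem.Dict (Int × Int) String × Option (Int × Int) × Option (Int × Int)) t =>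
        let g := st.1.insert (t.1, t.2.1) t.2.2
        if t.2.2 = "S" then (g, some (t.1, t.2.1), st.2.2)
        else if t.2.2 = "E" then (g, st.2.1, some (t.1, t.2.1))
        else (g, st.2.1, st.2.2))
      (PySem.Dict.empty, none, none)
  match init.2.1, init.2.2 with
  | some sp, some ep =>
    bfsA init.1 ep (1024 * hex_list.length + 1) [(sp.1, sp.2, 0, 0)]
      (PySem.Set.ofList [(sp.1, sp.2, 0)])
  | _, _ => -1

-- ===== PORT B =====
-- same two Python built-ins, transliterated for Source B (see the comments on strLeA/ordA)
def strLeB (a b : List Char) : Bool := !PySem.Chars.strLt b a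
def ordB (c : List Char) : Nat := (c.headD 'A').toNat

def deltasB : List (Int × Int) := [(1, 0), (1, -1), (0, -1), (-1, 0), (-1, 1), (0, 1)]

-- the 'for depth in range(1024*len+1)' relaxation loop of Source B: the Nat argument counts the
-- rounds the range still allows, the Int argument is the current depth, the Set the reached states
def iterB (grid : PySem.Dict (Int × Int) String) (endp : Int × Int) :
    Nat → Int → PySem.Set (Int × Int × Nat) → Int
  | 0, _, _ => -1
  | n + 1, depth, reach =>
    if reach.any (fun s => decide ((s.1, s.2.1) = endp)) then depth
    else
      let bigger := reach.foldl (fun b s =>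
        deltasB.foldl (fun b dd =>
          match grid.get? (s.1 + dd.1, s.2.1 + dd.2) with
          | none => b
          | some cell =>
            if cell = "#" then b
            else if strLeB "A".toList cell.toList && strLeB cell.toList "J".toList && cell != "E"
                && ((s.2.2 >>> (ordB cell.toList - 65)) &&& 1 == 0) then b
            else if strLeB "a".toList cell.toList && strLeB cell.toList "j".toList then
              PySem.Set.add b (s.1 + dd.1, s.2.1 + dd.2, s.2.2 ^^^ (1 <<< (ordB cell.toList - 97)))
            else PySem.Set.add b (s.1 + dd.1, s.2.1 + dd.2, s.2.2)) b) reach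
      if bigger.length = reach.length then -1
      else iterB grid endp n (depth + 1) bigger

def solve_hex_arena_alt (hex_list : List (Int × Int × String)) : Int :=
  let grid := hex_list.foldl (fun g t => g.insert (t.1, t.2.1) t.2.2) PySem.Dict.empty
  let se :=
    hex_list.foldl
      (fun (st : Option (Int × Int) × Option (Int × Int)) t =>
        if t.2.2 = "S" then (some (t.1, t.2.1), st.2)
        else if t.2.2 = "E" then (st.1, some (t.1, t.2.1))
        else st)
      (none, none)
  match se.1 with
  | none => -1
  | some sp =>
    match se.2 with
    | none => -1
    | some ep =>
      iterB grid ep (1024 * hex_list.length + 1) 0 (PySem.Set.ofList [(sp.1, sp.2, 0)])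

-- ===== PRECONDITION & SPEC =====
-- Pre_ excludes inputs that contain a cell string of length ≥ 2 lying (lexicographically) in the
-- barrier range "A".."J" (except "E") or the plate range "a".."j" while both an "S" and an "E"
-- cell are present: when the search reaches such a cell Python's ord(cell) raises TypeError (both
-- A and B raise identically); when it is unreachable A returns -1, which Pre_ conservatively also
-- excludes (closed-form reachability is not expressible).
def Pre_solve_hex_arena (hex_list : List (Int × Int × String)) : Prop :=
  (∀ t ∈ hex_list, t.2.2 ≠ "S") ∨ (∀ t ∈ hex_list, t.2.2 ≠ "E") ∨
    (∀ t ∈ hex_list, ¬ (1 < t.2.2.toList.length ∧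
      (((!PySem.Chars.strLt t.2.2.toList "A".toList) && !PySem.Chars.strLt "J".toList t.2.2.toList) = true ∨
       ((!PySem.Chars.strLt t.2.2.toList "a".toList) && !PySem.Chars.strLt "j".toList t.2.2.toList) = true)))

instance (hex_list : List (Int × Int × String)) : Decidable (Pre_solve_hex_arena hex_list) := by
  unfold Pre_solve_hex_arena; infer_instance

def pvWitness_solve_hex_arena : (List (Int × Int × String)) :=
  [(0, 0, "S"), (1, 0, "a"), (0, 1, "A"), (1, -1, "#"), (2, 0, "E")]

def Spec_solve_hex_arena (hex_list : List (Int × Int × String)) (out : Int) : Prop := out = solve_hex_arena_alt hex_list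
instance (hex_list : List (Int × Int × String)) (out : Int) : Decidable (Spec_solve_hex_arena hex_list out) := by unfold Spec_solve_hex_arena; infer_instance

-- ===== CLAIM (what is proved, stated in full; the proofs are below) =====
def Claim_equal_solve_hex_arena : Prop := ∀ (hex_list : List (Int × Int × String)), Dom_solve_hex_arena hex_list → Pre_solve_hex_arena hex_list → Spec_solve_hex_arena hex_list (solve_hex_arena hex_list)

-- ===== LEMMAS AND PROOFS =====

-- step-onto-cell logic, shared by the proofs of both sides
def tryMove (grid : PySem.Dict (Int × Int) String) (nq nr : Int) (mask : Nat) :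
    Option (Int × Int × Nat) :=
  match grid.get? (nq, nr) with
  | none => none
  | some cell =>
    if cell = "#" then none
    else if strLeB "A".toList cell.toList && strLeB cell.toList "J".toList && cell != "E"
        && (mask &&& (1 <<< (ordB cell.toList - 65)) == 0) then none
    else if strLeB "a".toList cell.toList && strLeB cell.toList "j".toList then
      some (nq, nr, mask ^^^ (1 <<< (ordB cell.toList - 97)))
    else some (nq, nr, mask)

def succsOf (grid : PySem.Dict (Int × Int) String) (s : Int × Int × Nat) :
    List (Int × Int × Nat) :=
  deltasB.filterMap (fun dd => tryMove grid (s.1 + dd.1) (s.2.1 + dd.2) s.2.2)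

-- ---------- A-side machinery (queue BFS re-expressed level by level) ----------

-- inner 'for dq, dr' loop of A's port, rewritten through tryMove (proved equal to expandA below)
def expandT (grid : PySem.Dict (Int × Int) String) (q r : Int) (mask : Nat)
    (st : PySem.Set (Int × Int × Nat) × List (Int × Int × Nat)) (ds : List (Int × Int)) :
    PySem.Set (Int × Int × Nat) × List (Int × Int × Nat) :=
  ds.foldl (fun st dd =>
    match tryMove grid (q + dd.1) (r + dd.2) mask with
    | none => st
    | some s => if st.1.contains s then st else (st.1.add s, st.2 ++ [s])) st

-- result of processing one frontier level of A
inductive LevelRes where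
  | found : LevelRes
  | out : LevelRes
  | next : List (Int × Int × Nat) → PySem.Set (Int × Int × Nat) → Nat → LevelRes

def runLevel (grid : PySem.Dict (Int × Int) String) (endp : Int × Int) :
    List (Int × Int × Nat) → List (Int × Int × Nat) → PySem.Set (Int × Int × Nat) → Nat → LevelRes
  | [], acc, visited, fuel => .next acc visited fuel
  | _ :: _, _, _, 0 => .out
  | (q, r, mask) :: rest, acc, visited, f + 1 =>
    if (q, r) = endp then .found
    else
      let p := expandT grid q r mask (visited, []) deltasB
      runLevel grid endp rest (acc ++ p.2) p.1 f

theorem runLevel_fuel_le (grid : PySem.Dict (Int × Int) String) (endp : Int × Int) :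
    ∀ (F acc : List (Int × Int × Nat)) (V : PySem.Set (Int × Int × Nat)) (fuel : Nat)
      (N : List (Int × Int × Nat)) (V' : PySem.Set (Int × Int × Nat)) (f' : Nat),
      runLevel grid endp F acc V fuel = .next N V' f' → f' ≤ fuel := by
  intro F
  induction F with
  | nil => intro acc V fuel N V' f' h; simp [runLevel] at h; omega
  | cons s F ih =>
    intro acc V fuel N V' f' h
    obtain ⟨q, r, mask⟩ := s
    match fuel with
    | 0 => simp [runLevel] at h
    | f + 1 =>
      simp only [runLevel] at h
      split at h
      · exact absurd h (by simp)
      · exact Nat.le_trans (ih _ _ _ _ _ _ h) (Nat.le_succ f)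

theorem runLevel_fuel_lt (grid : PySem.Dict (Int × Int) String) (endp : Int × Int)
    (s : Int × Int × Nat) (F acc : List (Int × Int × Nat)) (V : PySem.Set (Int × Int × Nat))
    (fuel : Nat) (N : List (Int × Int × Nat)) (V' : PySem.Set (Int × Int × Nat)) (f' : Nat)
    (h : runLevel grid endp (s :: F) acc V fuel = .next N V' f') : f' < fuel := by
  obtain ⟨q, r, mask⟩ := s
  match fuel with
  | 0 => simp [runLevel] at h
  | f + 1 =>
    simp only [runLevel] at h
    split at h
    · exact absurd h (by simp)
    · exact Nat.lt_succ_of_le (runLevel_fuel_le grid endp _ _ _ _ _ _ _ h)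

-- A's BFS traversed level-synchronously (proof-side view of bfsA)
def lvlB (grid : PySem.Dict (Int × Int) String) (endp : Int × Int) :
    List (Int × Int × Nat) → PySem.Set (Int × Int × Nat) → Int → Nat → Int
  | [], _, _, _ => -1
  | s :: F, visited, depth, fuel =>
    match h : runLevel grid endp (s :: F) [] visited fuel with
    | .found => depth
    | .out => -1
    | .next N V' f' => lvlB grid endp N V' (depth + 1) f'
termination_by _ _ _ fuel => fuel
decreasing_by exact runLevel_fuel_lt grid endp s F [] visited fuel N V' f' h

-- the two inner neighbor loops compute the same (visited, appended-states) pair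
theorem expandA_eq_expandT (grid : PySem.Dict (Int × Int) String) (q r : Int) (mask : Nat)
    (visited : PySem.Set (Int × Int × Nat)) :
    expandA grid q r mask visited = expandT grid q r mask (visited, []) deltasB := by
  unfold expandA expandT neighborsA deltasB
  congr 1
  funext st dd
  simp only [tryMove, strLeA, strLeB, ordA, ordB]
  rcases grid.get? (q + dd.1, r + dd.2) with _ | cell
  · rfl
  · simp only
    split_ifs with h1 h2 h3 h3 <;> simp_all

-- A's combined grid/start/end fold splits into separate grid and start/end folds
theorem setup_split (hex_list : List (Int × Int × String)) :
    ∀ (g : PySem.Dict (Int × Int) String) (s e : Option (Int × Int)),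
      hex_list.foldl
        (fun (st : PySem.Dict (Int × Int) String × Option (Int × Int) × Option (Int × Int)) t =>
          let g := st.1.insert (t.1, t.2.1) t.2.2
          if t.2.2 = "S" then (g, some (t.1, t.2.1), st.2.2)
          else if t.2.2 = "E" then (g, st.2.1, some (t.1, t.2.1))
          else (g, st.2.1, st.2.2)) (g, s, e) =
      (hex_list.foldl (fun g t => g.insert (t.1, t.2.1) t.2.2) g,
       hex_list.foldl
        (fun (st : Option (Int × Int) × Option (Int × Int)) t =>
          if t.2.2 = "S" then (some (t.1, t.2.1), st.2)
          else if t.2.2 = "E" then (st.1, some (t.1, t.2.1))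
          else st) (s, e)) := by
  induction hex_list with
  | nil => intro g s e; rfl
  | cons t rest ih =>
    intro g s e
    simp only [List.foldl_cons]
    split_ifs <;> exact ih _ _ _

-- processing one whole frontier level equals popping those states one by one in A's deque BFS
theorem level_eq (grid : PySem.Dict (Int × Int) String) (endp : Int × Int) (d : Int) :
    ∀ (F acc : List (Int × Int × Nat)) (V : PySem.Set (Int × Int × Nat)) (fuel : Nat),
      bfsA grid endp fuel
        (F.map (fun s => (s.1, s.2.1, s.2.2, d)) ++ acc.map (fun s => (s.1, s.2.1, s.2.2, d + 1))) V =
      (match runLevel grid endp F acc V fuel with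
       | .found => d
       | .out => -1
       | .next N V' f' => bfsA grid endp f' (N.map (fun s => (s.1, s.2.1, s.2.2, d + 1))) V') := by
  intro F
  induction F with
  | nil =>
    intro acc V fuel
    simp [runLevel]
  | cons s F ih =>
    intro acc V fuel
    obtain ⟨q, r, mask⟩ := s
    match fuel with
    | 0 =>
      simp only [List.map_cons, List.cons_append, runLevel]
      rfl
    | f + 1 =>
      simp only [List.map_cons, List.cons_append, runLevel, bfsA]
      split_ifs with h
      · rfl
      · rw [expandA_eq_expandT]
        have := ih (acc ++ (expandT grid q r mask (V, []) deltasB).2)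
          (expandT grid q r mask (V, []) deltasB).1 f
        simp only [List.map_append] at this
        rw [List.append_assoc]
        exact this

-- level-synchronous view equals deque BFS when the whole frontier carries depth d
theorem lvlB_eq_bfsA (grid : PySem.Dict (Int × Int) String) (endp : Int × Int) :
    ∀ (fuel : Nat) (F : List (Int × Int × Nat)) (V : PySem.Set (Int × Int × Nat)) (d : Int),
      lvlB grid endp F V d fuel =
      bfsA grid endp fuel (F.map (fun s => (s.1, s.2.1, s.2.2, d))) V := by
  intro fuel
  induction fuel using Nat.strong_induction_on with
  | _ fuel ih =>
    intro F V d
    match F with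
    | [] =>
      rw [lvlB]
      cases fuel <;> rfl
    | s :: F =>
      rw [lvlB]
      have hlev := level_eq grid endp d (s :: F) [] V fuel
      simp only [List.map_nil, List.append_nil] at hlev
      rw [hlev]
      cases h : runLevel grid endp (s :: F) [] V fuel with
      | found => rfl
      | out => rfl
      | next N V' f' =>
        simp only
        exact ih f' (runLevel_fuel_lt grid endp s F [] V fuel N V' f' h) N V' (d + 1)

-- ---------- characterization of one expanded state ----------

theorem expandT_char (grid : PySem.Dict (Int × Int) String) (q r : Int) (mask : Nat) :
    ∀ (ds : List (Int × Int)) (S : PySem.Set (Int × Int × Nat)) (L : List (Int × Int × Nat)),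
      (∀ x, x ∈ (expandT grid q r mask (S, L) ds).1 ↔
        x ∈ S ∨ x ∈ ds.filterMap (fun dd => tryMove grid (q + dd.1) (r + dd.2) mask)) ∧
      (∀ x, x ∈ (expandT grid q r mask (S, L) ds).2 ↔
        x ∈ L ∨ (x ∈ ds.filterMap (fun dd => tryMove grid (q + dd.1) (r + dd.2) mask) ∧ x ∉ S)) ∧
      (expandT grid q r mask (S, L) ds).1.length + L.length
        = S.length + (expandT grid q r mask (S, L) ds).2.length ∧
      (S.Nodup → (expandT grid q r mask (S, L) ds).1.Nodup) := by
  intro ds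
  induction ds with
  | nil =>
    intro S L
    exact ⟨fun x => by simp [expandT], fun x => by simp [expandT], by simp [expandT],
      fun h => by simpa [expandT] using h⟩
  | cons dd ds ih =>
    intro S L
    rcases hmv : tryMove grid (q + dd.1) (r + dd.2) mask with _ | y
    · have hstep : expandT grid q r mask (S, L) (dd :: ds) = expandT grid q r mask (S, L) ds := by
        simp [expandT, List.foldl_cons, hmv]
      obtain ⟨i1, i2, i3, i4⟩ := ih S L
      rw [hstep]
      refine ⟨fun x => ?_, fun x => ?_, i3, i4⟩
      · rw [i1]; simp [hmv]
      · rw [i2]; simp [hmv]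
    · by_cases hy : y ∈ S
      · have hstep : expandT grid q r mask (S, L) (dd :: ds) = expandT grid q r mask (S, L) ds := by
          simp [expandT, List.foldl_cons, hmv, hy]
        obtain ⟨i1, i2, i3, i4⟩ := ih S L
        rw [hstep]
        refine ⟨fun x => ?_, fun x => ?_, i3, i4⟩
        · rw [i1]
          simp only [List.filterMap_cons, hmv, List.mem_cons]
          by_cases hxy : x = y
          · subst hxy; tauto
          · tauto
        · rw [i2]
          simp only [List.filterMap_cons, hmv, List.mem_cons]
          by_cases hxy : x = y
          · subst hxy; tauto
          · tauto
      · have hstep : expandT grid q r mask (S, L) (dd :: ds)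
            = expandT grid q r mask (S.add y, L ++ [y]) ds := by
          simp [expandT, List.foldl_cons, hmv, hy]
        obtain ⟨i1, i2, i3, i4⟩ := ih (S.add y) (L ++ [y])
        rw [hstep]
        refine ⟨fun x => ?_, fun x => ?_, ?_, fun hnd => i4 (PySem.Set.nodup_add _ _ hnd)⟩
        · rw [i1]
          simp only [PySem.Set.mem_add, List.filterMap_cons, hmv, List.mem_cons]
          tauto
        · rw [i2]
          simp only [PySem.Set.mem_add, List.mem_append,
            List.filterMap_cons, hmv, List.mem_cons]
          by_cases hxy : x = y
          · subst hxy; tauto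
          · tauto
        · have hl1 : (S.add y).length = S.length + 1 := by
            rw [PySem.Set.add_of_not_mem hy, List.length_append, List.length_cons, List.length_nil]
          have hl2 : (L ++ [y]).length = L.length + 1 := by
            rw [List.length_append, List.length_cons, List.length_nil]
          omega

-- ---------- characterization of one whole level ----------

theorem runLevel_found (grid : PySem.Dict (Int × Int) String) (endp : Int × Int) :
    ∀ (F acc : List (Int × Int × Nat)) (V : PySem.Set (Int × Int × Nat)) (fuel : Nat),
      (∃ s ∈ F, (s.1, s.2.1) = endp) → F.length ≤ fuel →
      runLevel grid endp F acc V fuel = .found := by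
  intro F
  induction F with
  | nil => intro acc V fuel hex _; obtain ⟨s, hs, _⟩ := hex; exact absurd hs List.not_mem_nil
  | cons s F ih =>
    intro acc V fuel hex hlen
    obtain ⟨q, r, mask⟩ := s
    match fuel, hlen with
    | f + 1, hlen =>
      simp only [runLevel]
      by_cases hp : (q, r) = endp
      · rw [if_pos hp]
      · rw [if_neg hp]
        apply ih
        · obtain ⟨s', hs', hp'⟩ := hex
          rcases List.mem_cons.1 hs' with h | h
          · rw [h] at hp'; exact absurd hp' hp
          · exact ⟨s', h, hp'⟩
        · simpa using Nat.le_of_succ_le_succ hlen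

theorem runLevel_next (grid : PySem.Dict (Int × Int) String) (endp : Int × Int) :
    ∀ (F acc : List (Int × Int × Nat)) (V : PySem.Set (Int × Int × Nat)) (fuel : Nat),
      (∀ s ∈ F, (s.1, s.2.1) ≠ endp) → F.length ≤ fuel →
      ∃ N V', runLevel grid endp F acc V fuel = .next N V' (fuel - F.length) ∧
        (∀ x, x ∈ V' ↔ x ∈ V ∨ ∃ s ∈ F, x ∈ succsOf grid s) ∧
        (∀ x, x ∈ N ↔ x ∈ acc ∨ ((∃ s ∈ F, x ∈ succsOf grid s) ∧ x ∉ V)) ∧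
        V'.length + acc.length = V.length + N.length ∧
        (V.Nodup → V'.Nodup) := by
  intro F
  induction F with
  | nil =>
    intro acc V fuel _ _
    exact ⟨acc, V, by simp [runLevel], fun x => by simp, fun x => by simp, by omega, fun h => h⟩
  | cons s F ih =>
    intro acc V fuel hne hlen
    obtain ⟨q, r, mask⟩ := s
    match fuel, hlen with
    | f + 1, hlen =>
      have hp : ¬ ((q, r) = endp) := hne (q, r, mask) List.mem_cons_self
      obtain ⟨e1, e2, e3, e4⟩ := expandT_char grid q r mask deltasB V []
      have hsucc : deltasB.filterMap (fun dd => tryMove grid (q + dd.1) (r + dd.2) mask)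
          = succsOf grid (q, r, mask) := rfl
      rw [hsucc] at e1 e2
      simp only [List.not_mem_nil, false_or] at e2
      simp only [List.length_nil, Nat.add_zero] at e3
      obtain ⟨N, V', heq, j1, j2, j3, j4⟩ :=
        ih (acc ++ (expandT grid q r mask (V, []) deltasB).2)
          (expandT grid q r mask (V, []) deltasB).1 f
          (fun u hu => hne u (List.mem_cons_of_mem _ hu))
          (by simpa using Nat.le_of_succ_le_succ hlen)
      refine ⟨N, V', ?_, fun x => ?_, fun x => ?_, ?_, fun hnd => j4 (e4 hnd)⟩
      · simp only [runLevel, if_neg hp]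
        rw [heq]
        congr 1
        simp only [List.length_cons]
        omega
      · rw [j1]
        simp only [List.exists_mem_cons_iff]
        have E1 := e1 x
        constructor
        · rintro (h | h)
          · rcases E1.1 h with h' | h'
            · exact Or.inl h'
            · exact Or.inr (Or.inl h')
          · exact Or.inr (Or.inr h)
        · rintro (h | h | h)
          · exact Or.inl (E1.2 (Or.inl h))
          · exact Or.inl (E1.2 (Or.inr h))
          · exact Or.inr h
      · rw [j2]
        simp only [List.mem_append, List.exists_mem_cons_iff]
        have E1 := e1 x
        have E2 := e2 x
        constructor
        · rintro ((h | h) | ⟨h1, h2⟩)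
          · exact Or.inl h
          · exact Or.inr ⟨Or.inl (E2.1 h).1, (E2.1 h).2⟩
          · exact Or.inr ⟨Or.inr h1, fun w => h2 (E1.2 (Or.inl w))⟩
        · rintro (h | ⟨h1 | h1, h2⟩)
          · exact Or.inl (Or.inl h)
          · exact Or.inl (Or.inr (E2.2 ⟨h1, h2⟩))
          · by_cases hxp : x ∈ (expandT grid q r mask (V, []) deltasB).1
            · rcases E1.1 hxp with h' | h'
              · exact absurd h' h2
              · exact Or.inl (Or.inr (E2.2 ⟨h', h2⟩))
            · exact Or.inr ⟨h1, hxp⟩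
      · have hla : (acc ++ (expandT grid q r mask (V, []) deltasB).2).length
            = acc.length + (expandT grid q r mask (V, []) deltasB).2.length :=
          List.length_append
        omega

theorem bit_test_eq (mask k : Nat) : ((mask >>> k) &&& 1 = 0) ↔ (mask &&& (1 <<< k) = 0) := by
  rw [Nat.one_shiftLeft, Nat.and_two_pow, Nat.and_one_is_mod, Nat.shiftRight_eq_div_pow]
  rcases h : mask.testBit k <;>
    rw [Nat.testBit, Nat.and_comm, Nat.and_one_is_mod, Nat.shiftRight_eq_div_pow] at h <;>
    simp at h <;> simp [h]

-- ---------- B-side machinery: the round expansion of iterB ----------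

theorem foldl_adds_mem {α : Type} [BEq α] [LawfulBEq α] (L : List α) :
    ∀ (S : PySem.Set α) (x : α), x ∈ L.foldl PySem.Set.add S ↔ x ∈ S ∨ x ∈ L := by
  induction L with
  | nil => simp
  | cons y L ih =>
    intro S x
    simp only [List.foldl_cons, ih, PySem.Set.mem_add, List.mem_cons]
    tauto

theorem foldl_adds_nodup {α : Type} [BEq α] [LawfulBEq α] (L : List α) :
    ∀ (S : PySem.Set α), S.Nodup → (L.foldl PySem.Set.add S).Nodup := by
  induction L with
  | nil => intro S h; exact h
  | cons y L ih => intro S h; exact ih _ (PySem.Set.nodup_add _ _ h)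

theorem foldl_match_add {δ α : Type} [BEq α] (f : δ → Option α) :
    ∀ (ds : List δ) (b : PySem.Set α),
      ds.foldl (fun b d => match f d with | none => b | some y => PySem.Set.add b y) b
        = (ds.filterMap f).foldl PySem.Set.add b := by
  intro ds
  induction ds with
  | nil => intro b; rfl
  | cons d ds ih =>
    intro b
    simp only [List.foldl_cons, List.filterMap_cons]
    cases f d <;> simp [ih]

theorem beq_zero_congr (a b : Nat) (h : a = 0 ↔ b = 0) : (a == 0) = (b == 0) := by
  by_cases ha : a = 0
  · simp [ha, h.1 ha]
  · have hb : ¬ b = 0 := fun w => ha (h.2 w)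
    simp [ha, hb]

-- the inline double loop of iterB is the fold of Set.add over the successor lists
theorem iterB_bigger_eq (grid : PySem.Dict (Int × Int) String) :
    ∀ (R : List (Int × Int × Nat)) (b : PySem.Set (Int × Int × Nat)),
      R.foldl (fun b s =>
        deltasB.foldl (fun b dd =>
          match grid.get? (s.1 + dd.1, s.2.1 + dd.2) with
          | none => b
          | some cell =>
            if cell = "#" then b
            else if strLeB "A".toList cell.toList && strLeB cell.toList "J".toList && cell != "E"
                && ((s.2.2 >>> (ordB cell.toList - 65)) &&& 1 == 0) then b
            else if strLeB "a".toList cell.toList && strLeB cell.toList "j".toList then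
              PySem.Set.add b (s.1 + dd.1, s.2.1 + dd.2, s.2.2 ^^^ (1 <<< (ordB cell.toList - 97)))
            else PySem.Set.add b (s.1 + dd.1, s.2.1 + dd.2, s.2.2)) b) b
      = R.foldl (fun b s => (succsOf grid s).foldl PySem.Set.add b) b := by
  have hf : (fun (b : PySem.Set (Int × Int × Nat)) (s : Int × Int × Nat) =>
      deltasB.foldl (fun b dd =>
        match grid.get? (s.1 + dd.1, s.2.1 + dd.2) with
        | none => b
        | some cell =>
          if cell = "#" then b
          else if strLeB "A".toList cell.toList && strLeB cell.toList "J".toList && cell != "E"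
              && ((s.2.2 >>> (ordB cell.toList - 65)) &&& 1 == 0) then b
          else if strLeB "a".toList cell.toList && strLeB cell.toList "j".toList then
            PySem.Set.add b (s.1 + dd.1, s.2.1 + dd.2, s.2.2 ^^^ (1 <<< (ordB cell.toList - 97)))
          else PySem.Set.add b (s.1 + dd.1, s.2.1 + dd.2, s.2.2)) b)
      = (fun b s => (succsOf grid s).foldl PySem.Set.add b) := by
    funext b s
    rw [succsOf, ← foldl_match_add]
    congr 1
    funext b dd
    simp only [tryMove]
    rcases hcell : grid.get? (s.1 + dd.1, s.2.1 + dd.2) with _ | cell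
    · rfl
    · simp only
      by_cases h1 : cell = "#"
      · simp [h1]
      · rw [if_neg h1, if_neg h1]
        have hbit : ((s.2.2 >>> (ordB cell.toList - 65)) &&& 1 == 0)
            = (s.2.2 &&& (1 <<< (ordB cell.toList - 65)) == 0) :=
          beq_zero_congr _ _ (bit_test_eq s.2.2 (ordB cell.toList - 65))
        rw [hbit]
        split_ifs <;> rfl
  rw [hf]
  exact fun R b => rfl

theorem round_mem (grid : PySem.Dict (Int × Int) String) :
    ∀ (R : List (Int × Int × Nat)) (b : PySem.Set (Int × Int × Nat)) (x : Int × Int × Nat),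
      x ∈ R.foldl (fun b s => (succsOf grid s).foldl PySem.Set.add b) b ↔
        x ∈ b ∨ ∃ s ∈ R, x ∈ succsOf grid s := by
  intro R
  induction R with
  | nil => simp
  | cons s R ih =>
    intro b x
    simp only [List.foldl_cons, ih, foldl_adds_mem, List.exists_mem_cons_iff]
    tauto

theorem round_nodup (grid : PySem.Dict (Int × Int) String) :
    ∀ (R : List (Int × Int × Nat)) (b : PySem.Set (Int × Int × Nat)),
      b.Nodup → (R.foldl (fun b s => (succsOf grid s).foldl PySem.Set.add b) b).Nodup := by
  intro R
  induction R with
  | nil => intro b h; exact h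
  | cons s R ih => intro b h; exact ih _ (foldl_adds_nodup _ _ h)

-- ---------- nodup-list cardinality facts ----------

theorem length_eq_of_mutual_subset {α : Type} [DecidableEq α] (l₁ l₂ : List α)
    (h₁ : l₁.Nodup) (h₂ : l₂.Nodup) (hs : ∀ x, x ∈ l₁ ↔ x ∈ l₂) : l₁.length = l₂.length := by
  exact List.Perm.length_eq ((List.perm_ext_iff_of_nodup h₁ h₂).2 hs)

theorem length_ne_of_extra {α : Type} [DecidableEq α] (l₁ l₂ : List α)
    (h₁ : l₁.Nodup) (h₂ : l₂.Nodup) (hs : ∀ x ∈ l₁, x ∈ l₂) (x₀ : α) (hx : x₀ ∈ l₂)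
    (hnx : x₀ ∉ l₁) : l₂.length ≠ l₁.length := by
  have hsub : l₁.toFinset ⊂ l₂.toFinset := by
    constructor
    · intro y hy
      rw [List.mem_toFinset] at hy ⊢
      exact hs y hy
    · intro hcon
      exact hnx (List.mem_toFinset.1 (hcon (List.mem_toFinset.2 hx)))
  have hcard := Finset.card_lt_card hsub
  rw [List.toFinset_card_of_nodup h₁, List.toFinset_card_of_nodup h₂] at hcard
  omega

-- good states: position present in the grid, mask below 2^10
def GoodSt (grid : PySem.Dict (Int × Int) String) (s : Int × Int × Nat) : Prop :=
  ((grid.get? (s.1, s.2.1)).isSome = true) ∧ s.2.2 < 1024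

theorem good_card (grid : PySem.Dict (Int × Int) String) (L : List (Int × Int × Nat))
    (hnd : L.Nodup) (hg : ∀ x ∈ L, GoodSt grid x) : L.length ≤ 1024 * grid.keys.length := by
  have hinj : Function.Injective (fun (s : Int × Int × Nat) => ((s.1, s.2.1), s.2.2)) := by
    intro a b hab
    obtain ⟨a1, a2, a3⟩ := a; obtain ⟨b1, b2, b3⟩ := b
    simp only [Prod.mk.injEq] at hab
    simp [hab.1.1, hab.1.2, hab.2]
  have hmapnd : (L.map (fun s => ((s.1, s.2.1), s.2.2))).Nodup := hnd.map hinj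
  have hsub : (L.map (fun s => ((s.1, s.2.1), s.2.2))).toFinset ⊆
      grid.keys.toFinset ×ˢ Finset.range 1024 := by
    intro y hy
    rw [List.mem_toFinset, List.mem_map] at hy
    obtain ⟨x, hxL, hxy⟩ := hy
    obtain ⟨hsome, hmask⟩ := hg x hxL
    rw [Finset.mem_product]
    constructor
    · rw [List.mem_toFinset, ← PySem.Dict.contains_iff_mem_keys, PySem.Dict.contains_eq_isSome_get?]
      rw [← hxy]
      exact hsome
    · rw [Finset.mem_range, ← hxy]
      exact hmask
  have h1 : L.length = (L.map (fun s => ((s.1, s.2.1), s.2.2))).toFinset.card := by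
    rw [List.toFinset_card_of_nodup hmapnd, List.length_map]
  have h2 := Finset.card_le_card hsub
  rw [Finset.card_product, Finset.card_range] at h2
  have h3 : grid.keys.toFinset.card ≤ grid.keys.length := List.toFinset_card_le _
  calc L.length = _ := h1
    _ ≤ grid.keys.toFinset.card * 1024 := h2
    _ ≤ grid.keys.length * 1024 := Nat.mul_le_mul_right _ h3
    _ = 1024 * grid.keys.length := Nat.mul_comm _ _

-- ---------- facts needed for closure under successors ----------

theorem strLt_singleton_ge (a c : Char) (h : PySem.Chars.strLt [c] [a] = false) :
    a.toNat ≤ c.toNat := by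
  simp only [PySem.Chars.strLt, decide_eq_false_iff_not, List.cons_lt_cons_iff, not_or] at h
  have hle : a ≤ c := not_lt.mp h.1
  exact hle

theorem succs_good (grid : PySem.Dict (Int × Int) String)
    (hplate : ∀ p c, grid.get? p = some c → ¬ (1 < c.toList.length ∧
      (((!PySem.Chars.strLt c.toList "A".toList) && !PySem.Chars.strLt "J".toList c.toList) = true ∨
       ((!PySem.Chars.strLt c.toList "a".toList) && !PySem.Chars.strLt "j".toList c.toList) = true)))
    (s : Int × Int × Nat) (hgood : GoodSt grid s) :
    ∀ x ∈ succsOf grid s, GoodSt grid x := by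
  intro x hx
  rw [succsOf, List.mem_filterMap] at hx
  obtain ⟨dd, _, hmv⟩ := hx
  rw [tryMove] at hmv
  rcases hcell : grid.get? (s.1 + dd.1, s.2.1 + dd.2) with _ | cell
  · rw [hcell] at hmv; exact absurd hmv (by simp)
  · rw [hcell] at hmv
    simp only at hmv
    split_ifs at hmv with h1 h2 h3
    · -- plate branch
      have hx := Option.some.inj hmv
      subst hx
      refine ⟨by show (grid.get? (s.1 + dd.1, s.2.1 + dd.2)).isSome = true; rw [hcell]; rfl, ?_⟩
      show s.2.2 ^^^ (1 <<< (ordB cell.toList - 97)) < 1024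
      have hrange := hplate _ _ hcell
      have hplate_true : ((!PySem.Chars.strLt cell.toList "a".toList)
          && !PySem.Chars.strLt "j".toList cell.toList) = true := by
        simpa [strLeB] using h3
      have hlen : ¬ (1 < cell.toList.length) := fun w => hrange ⟨w, Or.inr hplate_true⟩
      rcases hcl : cell.toList with _ | ⟨c, cs⟩
      · rw [hcl] at hplate_true
        exact absurd hplate_true (by decide)
      · have hcs : cs = [] := by
          rw [hcl] at hlen
          simp only [List.length_cons] at hlen
          cases cs
          · rfl
          · simp at hlen
        subst hcs
        rw [hcl] at hplate_true
        rw [Bool.and_eq_true] at hplate_true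
        obtain ⟨hpa, hpb⟩ := hplate_true
        rw [Bool.not_eq_true'] at hpa hpb
        have ha : ("a".toList : List Char) = ['a'] := rfl
        have hj : ("j".toList : List Char) = ['j'] := rfl
        rw [ha] at hpa
        rw [hj] at hpb
        have hlo : ('a').toNat ≤ c.toNat := strLt_singleton_ge 'a' c hpa
        have hhi : c.toNat ≤ ('j').toNat := strLt_singleton_ge c 'j' hpb
        have hk : ordB [c] - 97 ≤ 9 := by
          simp only [ordB, List.headD]
          have ha' : ('a').toNat = 97 := rfl
          have hj' : ('j').toNat = 106 := rfl
          omega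
        have hpow : 1 <<< (ordB [c] - 97) < 1024 := by
          rw [Nat.one_shiftLeft]
          calc (2 : Nat) ^ (ordB [c] - 97) ≤ 2 ^ 9 :=
              Nat.pow_le_pow_right (by norm_num) hk
            _ < 1024 := by norm_num
        have h1024 : (1024 : Nat) = 2 ^ 10 := by norm_num
        rw [h1024]
        exact Nat.xor_lt_two_pow (h1024 ▸ hgood.2) (h1024 ▸ hpow)
    · -- plain passable cell
      have hx := Option.some.inj hmv
      subst hx
      exact ⟨by show (grid.get? (s.1 + dd.1, s.2.1 + dd.2)).isSome = true; rw [hcell]; rfl,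
        hgood.2⟩

-- ---------- the coupling of the two searches ----------

theorem couple (grid : PySem.Dict (Int × Int) String) (endp : Int × Int) (Bound : Nat)
    (hclose : ∀ s, GoodSt grid s → ∀ x ∈ succsOf grid s, GoodSt grid x)
    (hB : ∀ L : List (Int × Int × Nat), L.Nodup → (∀ x ∈ L, GoodSt grid x) → L.length ≤ Bound) :
    ∀ (nB : Nat) (fuelA : Nat) (F : List (Int × Int × Nat))
      (V reach : PySem.Set (Int × Int × Nat)) (d : Int),
      V.Nodup → reach.Nodup →
      (∀ x, x ∈ V ↔ x ∈ reach) →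
      (∀ x ∈ F, x ∈ V) →
      (∀ x ∈ V, x ∉ F → (x.1, x.2.1) ≠ endp) →
      (∀ x ∈ V, x ∉ F → ∀ y ∈ succsOf grid x, y ∈ V) →
      (∀ x ∈ V, GoodSt grid x) →
      F.length + (Bound - V.length) ≤ fuelA →
      V.length ≤ Bound →
      Bound - V.length + 1 ≤ nB →
      lvlB grid endp F V d fuelA = iterB grid endp nB d reach := by
  intro nB
  induction nB with
  | zero =>
    intro fuelA F V reach d _ _ _ _ _ _ _ _ hVB hnB
    omega
  | succ n ih =>
    intro fuelA F V reach d hVnd hRnd hVR hFV hCend hClosed hGood hfA hVB hnB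
    have hstep : iterB grid endp (n + 1) d reach
        = (if reach.any (fun s => decide ((s.1, s.2.1) = endp)) then d
           else if (reach.foldl (fun b s => (succsOf grid s).foldl PySem.Set.add b) reach).length
               = reach.length then (-1 : Int)
             else iterB grid endp n (d + 1)
               (reach.foldl (fun b s => (succsOf grid s).foldl PySem.Set.add b) reach)) := by
      simp only [iterB, iterB_bigger_eq]
    rw [hstep]
    by_cases hany : reach.any (fun s => decide ((s.1, s.2.1) = endp)) = true
    · rw [if_pos hany]
      rw [List.any_eq_true] at hany
      obtain ⟨s, hsR, hsd⟩ := hany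
      replace hsd := of_decide_eq_true hsd
      have hsV : s ∈ V := (hVR s).2 hsR
      have hsF : s ∈ F := by
        by_contra hnF
        exact hCend s hsV hnF hsd
      rcases hFc : F with _ | ⟨s0, F0⟩
      · rw [hFc] at hsF; exact absurd hsF List.not_mem_nil
      · rw [hFc] at hsF hfA
        have hfound := runLevel_found grid endp (s0 :: F0) [] V fuelA ⟨s, hsF, hsd⟩ (by omega)
        obtain ⟨q0, r0, m0⟩ := s0
        rw [lvlB]
        split
        · rfl
        · next hcase => simp [hfound] at hcase
        · next N V' f' hcase => simp [hfound] at hcase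
    · rw [if_neg hany]
      have hnone : ∀ s ∈ reach, (s.1, s.2.1) ≠ endp := by
        intro s hs hd
        exact hany (List.any_eq_true.2 ⟨s, hs, decide_eq_true hd⟩)
      have memB2 := round_mem grid reach reach
      have ndB2 := round_nodup grid reach reach hRnd
      rcases hFc : F with _ | ⟨⟨q0, r0, m0⟩, F0⟩
      · -- empty frontier: both stabilize to -1
        have hsub : ∀ x ∈ reach.foldl (fun b s => (succsOf grid s).foldl PySem.Set.add b) reach,
            x ∈ reach := by
          intro x hx
          rcases (memB2 x).1 hx with h | ⟨s, hsR, hxs⟩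
          · exact h
          · have hsV : s ∈ V := (hVR s).2 hsR
            exact (hVR x).1 (hClosed s hsV (by rw [hFc]; exact List.not_mem_nil) x hxs)
        have hlen : (reach.foldl (fun b s => (succsOf grid s).foldl PySem.Set.add b) reach).length
            = reach.length :=
          length_eq_of_mutual_subset _ _ ndB2 hRnd
            (fun x => ⟨fun h => hsub x h, fun h => (memB2 x).2 (Or.inl h)⟩)
        rw [if_pos hlen, lvlB]
      · -- nonempty frontier: run the level, recurse
        have hne : ∀ s ∈ (q0, r0, m0) :: F0, (s.1, s.2.1) ≠ endp := by
          intro s hs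
          have hsF : s ∈ F := by rw [hFc]; exact hs
          exact hnone s ((hVR s).1 (hFV s hsF))
        rw [hFc] at hfA
        obtain ⟨N, V', heq, j1, j2, j3, j4⟩ :=
          runLevel_next grid endp ((q0, r0, m0) :: F0) [] V fuelA hne (by omega)
        simp only [List.not_mem_nil, false_or] at j2
        simp only [List.length_nil, Nat.add_zero] at j3
        have memV'B2 : ∀ x, x ∈ V' ↔
            x ∈ reach.foldl (fun b s => (succsOf grid s).foldl PySem.Set.add b) reach := by
          intro x
          rw [j1, memB2 x]
          constructor
          · rintro (h | ⟨s, hsF, hxs⟩)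
            · exact Or.inl ((hVR x).1 h)
            · have hsF' : s ∈ F := by rw [hFc]; exact hsF
              exact Or.inr ⟨s, (hVR s).1 (hFV s hsF'), hxs⟩
          · rintro (h | ⟨s, hsR, hxs⟩)
            · exact Or.inl ((hVR x).2 h)
            · have hsV : s ∈ V := (hVR s).2 hsR
              by_cases hsF : s ∈ (q0, r0, m0) :: F0
              · exact Or.inr ⟨s, hsF, hxs⟩
              · exact Or.inl (hClosed s hsV (by rw [hFc]; exact hsF) x hxs)
        have hlvl : lvlB grid endp ((q0, r0, m0) :: F0) V d fuelA
            = lvlB grid endp N V' (d + 1) (fuelA - ((q0, r0, m0) :: F0).length) := by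
          rw [lvlB]
          split
          · next hcase => simp [heq] at hcase
          · next hcase => simp [heq] at hcase
          · next N2 V2 f2 hcase =>
              rw [heq] at hcase
              injection hcase with e1 e2 e3
              subst e1
              subst e2
              rw [e3]
        rw [hlvl]
        rcases hNc : N with _ | ⟨x1, N1⟩
        · -- nothing new: both return -1
          have hsub : ∀ x ∈ reach.foldl (fun b s => (succsOf grid s).foldl PySem.Set.add b) reach,
              x ∈ reach := by
            intro x hx
            rcases ((memV'B2 x).2 hx) |> (j1 x).1 with h | h
            · exact (hVR x).1 h
            · by_cases hxV : x ∈ V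
              · exact (hVR x).1 hxV
              · exact absurd ((j2 x).2 ⟨h, hxV⟩) (by rw [hNc]; exact List.not_mem_nil)
          have hlen : (reach.foldl (fun b s => (succsOf grid s).foldl PySem.Set.add b) reach).length
              = reach.length :=
            length_eq_of_mutual_subset _ _ ndB2 hRnd
              (fun x => ⟨fun h => hsub x h, fun h => (memB2 x).2 (Or.inl h)⟩)
          rw [if_pos hlen, lvlB]
        · -- growth: recurse via ih
          have hx1N : x1 ∈ N := by rw [hNc]; exact List.mem_cons_self
          have hx1 := (j2 x1).1 hx1N
          have hx1V' : x1 ∈ V' := (j1 x1).2 (Or.inr hx1.1)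
          have hx1B2 : x1 ∈ reach.foldl (fun b s => (succsOf grid s).foldl PySem.Set.add b) reach :=
            (memV'B2 x1).1 hx1V'
          have hx1R : x1 ∉ reach := fun w => hx1.2 ((hVR x1).2 w)
          have hlen : (reach.foldl (fun b s => (succsOf grid s).foldl PySem.Set.add b) reach).length
              ≠ reach.length :=
            length_ne_of_extra reach _ hRnd ndB2
              (fun x hx => (memB2 x).2 (Or.inl hx)) x1 hx1B2 hx1R
          rw [if_neg hlen, ← hNc]
          have hgoodV' : ∀ x ∈ V', GoodSt grid x := by
            intro x hx
            rcases (j1 x).1 hx with h | ⟨s, hsF, hxs⟩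
            · exact hGood x h
            · exact hclose s (hGood s (hFV s (by rw [hFc]; exact hsF))) x hxs
          have hV'nd : V'.Nodup := j4 hVnd
          have hV'B : V'.length ≤ Bound := hB V' hV'nd hgoodV'
          have hNpos : 0 < N.length := by rw [hNc]; simp
          apply ih
          · exact hV'nd
          · exact ndB2
          · exact memV'B2
          · intro x hxN
            exact (j1 x).2 (Or.inr ((j2 x).1 hxN).1)
          · intro x hxV' hxN
            rcases (j1 x).1 hxV' with h | h
            · exact hnone x ((hVR x).1 h)
            · by_cases hxV : x ∈ V
              · exact hnone x ((hVR x).1 hxV)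
              · exact absurd ((j2 x).2 ⟨h, hxV⟩) hxN
          · intro x hxV' hxN y hy
            have hxV : x ∈ V := by
              rcases (j1 x).1 hxV' with h | h
              · exact h
              · by_cases hxV : x ∈ V
                · exact hxV
                · exact absurd ((j2 x).2 ⟨h, hxV⟩) hxN
            by_cases hxF : x ∈ (q0, r0, m0) :: F0
            · exact (j1 y).2 (Or.inr ⟨x, hxF, hy⟩)
            · exact (j1 y).2 (Or.inl (hClosed x hxV (by rw [hFc]; exact hxF) y hy))
          · exact hgoodV'
          · omega
          · exact hV'B
          · omega

-- ---------- start/end fold and grid fold facts ----------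

theorem seFold_noS (l : List (Int × Int × String)) (h : ∀ t ∈ l, t.2.2 ≠ "S") :
    ∀ (s e : Option (Int × Int)),
      (l.foldl (fun (st : Option (Int × Int) × Option (Int × Int)) t =>
        if t.2.2 = "S" then (some (t.1, t.2.1), st.2)
        else if t.2.2 = "E" then (st.1, some (t.1, t.2.1))
        else st) (s, e)).1 = s := by
  revert h
  induction l with
  | nil => intro _ s e; rfl
  | cons t l ih =>
    intro h s e
    simp only [List.foldl_cons]
    by_cases h1 : t.2.2 = "S"
    · exact absurd h1 (h t List.mem_cons_self)
    · rw [if_neg h1]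
      by_cases h2 : t.2.2 = "E"
      · rw [if_pos h2]; exact ih (fun u hu => h u (List.mem_cons_of_mem _ hu)) s _
      · rw [if_neg h2]; exact ih (fun u hu => h u (List.mem_cons_of_mem _ hu)) s _

theorem seFold_noE (l : List (Int × Int × String)) (h : ∀ t ∈ l, t.2.2 ≠ "E") :
    ∀ (s e : Option (Int × Int)),
      (l.foldl (fun (st : Option (Int × Int) × Option (Int × Int)) t =>
        if t.2.2 = "S" then (some (t.1, t.2.1), st.2)
        else if t.2.2 = "E" then (st.1, some (t.1, t.2.1))
        else st) (s, e)).2 = e := by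
  revert h
  induction l with
  | nil => intro _ s e; rfl
  | cons t l ih =>
    intro h s e
    simp only [List.foldl_cons]
    by_cases h1 : t.2.2 = "S"
    · rw [if_pos h1]; exact ih (fun u hu => h u (List.mem_cons_of_mem _ hu)) _ e
    · rw [if_neg h1]
      by_cases h2 : t.2.2 = "E"
      · exact absurd h2 (h t List.mem_cons_self)
      · rw [if_neg h2]; exact ih (fun u hu => h u (List.mem_cons_of_mem _ hu)) _ e

theorem seFold_S_mem (l : List (Int × Int × String)) :
    ∀ (s e : Option (Int × Int)) (sp : Int × Int),
      (l.foldl (fun (st : Option (Int × Int) × Option (Int × Int)) t =>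
        if t.2.2 = "S" then (some (t.1, t.2.1), st.2)
        else if t.2.2 = "E" then (st.1, some (t.1, t.2.1))
        else st) (s, e)).1 = some sp →
      s = some sp ∨ ∃ t ∈ l, (t.1, t.2.1) = sp := by
  induction l with
  | nil => intro s e sp h; simp only [List.foldl_nil] at h; exact Or.inl h
  | cons t l ih =>
    intro s e sp h
    simp only [List.foldl_cons] at h
    by_cases h1 : t.2.2 = "S"
    · rw [if_pos h1] at h
      rcases ih _ _ _ h with h' | h'
      · exact Or.inr ⟨t, List.mem_cons_self, Option.some.inj h'⟩
      · obtain ⟨u, hu, hq⟩ := h'; exact Or.inr ⟨u, List.mem_cons_of_mem _ hu, hq⟩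
    · rw [if_neg h1] at h
      by_cases h2 : t.2.2 = "E" <;> [rw [if_pos h2] at h; rw [if_neg h2] at h] <;>
        · rcases ih _ _ _ h with h' | h'
          · exact Or.inl h'
          · obtain ⟨u, hu, hq⟩ := h'; exact Or.inr ⟨u, List.mem_cons_of_mem _ hu, hq⟩

theorem gridFold_isSome_mono (l : List (Int × Int × String)) :
    ∀ (g : PySem.Dict (Int × Int) String) (p : Int × Int),
      ((g.get? p).isSome = true) →
      (((l.foldl (fun g t => g.insert (t.1, t.2.1) t.2.2) g).get? p).isSome = true) := by
  induction l with
  | nil => intro g p h; exact h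
  | cons t l ih =>
    intro g p h
    simp only [List.foldl_cons]
    apply ih
    rw [PySem.Dict.get?_insert]
    split_ifs with h1
    · rfl
    · exact h

theorem gridFold_isSome_of_mem (l : List (Int × Int × String)) (t : Int × Int × String)
    (ht : t ∈ l) (g : PySem.Dict (Int × Int) String) :
    (((l.foldl (fun g t => g.insert (t.1, t.2.1) t.2.2) g).get? (t.1, t.2.1)).isSome = true) := by
  revert ht g
  induction l with
  | nil => intro ht; exact absurd ht (List.not_mem_nil)
  | cons u l ih =>
    intro ht g
    rcases List.mem_cons.1 ht with h1 | h1
    · subst h1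
      simp only [List.foldl_cons]
      apply gridFold_isSome_mono
      rw [PySem.Dict.get?_insert_self]
      rfl
    · exact ih h1 _

theorem gridFold_value (l : List (Int × Int × String)) :
    ∀ (g : PySem.Dict (Int × Int) String) (p : Int × Int) (c : String),
      (l.foldl (fun g t => g.insert (t.1, t.2.1) t.2.2) g).get? p = some c →
      g.get? p = some c ∨ ∃ t ∈ l, t.2.2 = c := by
  induction l with
  | nil => intro g p c h; exact Or.inl h
  | cons t l ih =>
    intro g p c h
    simp only [List.foldl_cons] at h
    rcases ih _ _ _ h with h' | h'
    · rw [PySem.Dict.get?_insert] at h'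
      split_ifs at h' with h1
      · exact Or.inr ⟨t, List.mem_cons_self, Option.some.inj h'⟩
      · exact Or.inl h'
    · exact Or.inr (by obtain ⟨u, hu, hq⟩ := h'; exact ⟨u, List.mem_cons_of_mem _ hu, hq⟩)

theorem gridFold_keys_le (l : List (Int × Int × String)) :
    (l.foldl (fun g t => g.insert (t.1, t.2.1) t.2.2) PySem.Dict.empty).keys.length ≤ l.length := by
  have hk := PySem.Dict.keys_foldl_insert_key (l := l) (key := fun t => (t.1, t.2.1))
    (f := fun (g : PySem.Dict (Int × Int) String) t => t.2.2) (d := PySem.Dict.empty)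
  rw [hk]
  have : (PySem.Dict.empty : PySem.Dict (Int × Int) String).keys = [] := rfl
  rw [this, PySem.Set.update_nil_left]
  calc (PySem.Set.ofList (l.map fun t => (t.1, t.2.1))).length
      ≤ (l.map fun t => (t.1, t.2.1)).length := PySem.Set.length_ofList_le _
    _ = l.length := List.length_map _



-- ===== VERDICT (by name: the statement is the Claim_ definition above) =====
theorem solve_hex_arena_spec : Claim_equal_solve_hex_arena := by
  intro hex_list _ hpre
  unfold Spec_solve_hex_arena solve_hex_arena solve_hex_arena_alt
  simp only [setup_split]
  rcases hse : (List.foldl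
      (fun (st : Option (Int × Int) × Option (Int × Int)) t =>
        if t.2.2 = "S" then (some (t.1, t.2.1), st.2)
        else if t.2.2 = "E" then (st.1, some (t.1, t.2.1))
        else st) (none, none) hex_list) with ⟨os, oe⟩
  rw [hse]
  cases os with
  | none => cases oe <;> rfl
  | some sp =>
    cases oe with
    | none => rfl
    | some ep =>
      obtain ⟨sq, sr⟩ := sp
      have hip3 : ∀ t ∈ hex_list, ¬ (1 < t.2.2.toList.length ∧
          (((!PySem.Chars.strLt t.2.2.toList "A".toList)
              && !PySem.Chars.strLt "J".toList t.2.2.toList) = true ∨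
           ((!PySem.Chars.strLt t.2.2.toList "a".toList)
              && !PySem.Chars.strLt "j".toList t.2.2.toList) = true)) := by
        rcases hpre with h1 | h2 | h3
        · have hs := seFold_noS hex_list h1 none none
          rw [hse] at hs
          simp at hs
        · have he := seFold_noE hex_list h2 none none
          rw [hse] at he
          simp at he
        · exact h3
      have hplate : ∀ p c,
          (hex_list.foldl (fun g t => g.insert (t.1, t.2.1) t.2.2) PySem.Dict.empty).get? p
            = some c → ¬ (1 < c.toList.length ∧
          (((!PySem.Chars.strLt c.toList "A".toList)
              && !PySem.Chars.strLt "J".toList c.toList) = true ∨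
           ((!PySem.Chars.strLt c.toList "a".toList)
              && !PySem.Chars.strLt "j".toList c.toList) = true)) := by
        intro p c hc
        rcases gridFold_value hex_list PySem.Dict.empty p c hc with h | ⟨t, ht, hv⟩
        · rw [PySem.Dict.get?_empty] at h
          cases h
        · rw [← hv]
          exact hip3 t ht
      have hsp_mem : ∃ t ∈ hex_list, (t.1, t.2.1) = (sq, sr) := by
        have hm := seFold_S_mem hex_list none none (sq, sr) (by rw [hse])
        rcases hm with h | h
        · cases h
        · exact h
      have hsp_some :
          ((hex_list.foldl (fun g t => g.insert (t.1, t.2.1) t.2.2)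
            PySem.Dict.empty).get? (sq, sr)).isSome = true := by
        obtain ⟨t, ht, hpt⟩ := hsp_mem
        have hi := gridFold_isSome_of_mem hex_list t ht PySem.Dict.empty
        rw [hpt] at hi
        exact hi
      have hkeys_pos : 0 < (hex_list.foldl (fun g t => g.insert (t.1, t.2.1) t.2.2)
          PySem.Dict.empty).keys.length := by
        have hc : (hex_list.foldl (fun g t => g.insert (t.1, t.2.1) t.2.2)
            PySem.Dict.empty).contains (sq, sr) = true := by
          rw [PySem.Dict.contains_eq_isSome_get?]
          exact hsp_some
        exact List.length_pos_of_mem ((PySem.Dict.contains_iff_mem_keys _ _).1 hc)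
      have hkeys_le := gridFold_keys_le hex_list
      have hlvl := lvlB_eq_bfsA
        (hex_list.foldl (fun g t => g.insert (t.1, t.2.1) t.2.2) PySem.Dict.empty) ep
        (1024 * hex_list.length + 1) [(sq, sr, 0)] (PySem.Set.ofList [(sq, sr, 0)]) 0
      simp only [List.map_cons, List.map_nil] at hlvl
      show bfsA (hex_list.foldl (fun g t => g.insert (t.1, t.2.1) t.2.2) PySem.Dict.empty) ep
          (1024 * hex_list.length + 1) [(sq, sr, 0, 0)] (PySem.Set.ofList [(sq, sr, 0)])
        = iterB (hex_list.foldl (fun g t => g.insert (t.1, t.2.1) t.2.2) PySem.Dict.empty) ep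
          (1024 * hex_list.length + 1) 0 (PySem.Set.ofList [(sq, sr, 0)])
      rw [← hlvl]
      have hof : (PySem.Set.ofList [((sq : Int), (sr : Int), (0 : Nat))])
          = [(sq, sr, 0)] := rfl
      apply couple _ ep
        (1024 * (hex_list.foldl (fun g t => g.insert (t.1, t.2.1) t.2.2)
          PySem.Dict.empty).keys.length)
        (fun s hs => succs_good _ hplate s hs)
        (fun L hnd hg => good_card _ L hnd hg)
      · rw [hof]; exact List.nodup_singleton _
      · rw [hof]; exact List.nodup_singleton _
      · exact fun x => Iff.rfl
      · exact fun x hx => hx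
      · intro x hx hnx
        rw [hof] at hx
        exact absurd hx hnx
      · intro x hx hnx
        rw [hof] at hx
        exact absurd hx hnx
      · intro x hx
        rw [hof] at hx
        rcases List.mem_singleton.1 hx with rfl
        exact ⟨hsp_some, by norm_num⟩
      · rw [hof]
        simp only [List.length_cons, List.length_nil]
        omega
      · rw [hof]
        simp only [List.length_cons, List.length_nil]
        omega
      · rw [hof]
        simp only [List.length_cons, List.length_nil]
        omega
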